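-- pv_equiv track=rewrite | github.com/mmh132/ProjectEuler | work/P382.py | f
-- ===== SOURCE A (Python) =====
-- from itertools import chain, combinations
--
-- def powerset(iterable):
--     xs = list(iterable)
--     return chain.from_iterable(combinations(xs,n) for n in range(1,len(xs)+1))
--
-- def f(n):
--     s = [1, 2, 3]
--     while len(s) < n:
--         s.append(s[-1] + s[-3])
--     rv = 2**n
--     for i in powerset(s):
--         if max(i) * 2 >= sum(i):
--             rv -= 1
--     return rv - 1
-- ===== SOURCE B (Python) =====
-- def count_le(xs, B):
--     # number of subsets of xs (all elements positive) with sum <= B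
--     if B < 0:
--         return 0
--     if sum(xs) <= B:
--         return 2 ** len(xs)
--     return count_le(xs[:-1], B) + count_le(xs[:-1], B - xs[-1])
--
-- def f(n):
--     # first n terms of the sequence 1, 2, 3, s[k] = s[k-1] + s[k-3]
--     s = []
--     a, b, c = 1, 2, 3
--     for _ in range(n):
--         s.append(a)
--         a, b, c = b, c, c + a
--     # count subsets by their maximal element s[j]: the subset is good
--     # iff the sum of the other chosen elements exceeds s[j]
--     good = 0
--     pre = []
--     for x in s:
--         good += 2 ** len(pre) - count_le(pre, x)
--         pre = pre + [x]
--     return good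
-- ===== Notes on version B (the rewrite author's own statement) =====
-- stated objective: alternative
-- what changed: Instead of enumerating the whole powerset and testing max/sum of every subset, B groups subsets by their maximal element s[j] and counts subsets of the prefix with sum <= s[j] by a pruned recursion that cuts off whole sub-powersets (bound negative, or remaining total within the bound), never materialising subsets.
-- intended difference: For n below three, A still tests all seven nonempty subsets of its hard-coded seed list against the smaller power 2**n and returns a negative count, while B counts polygon subsets of the first n terms only and returns zero, the intended count when fewer than three sides are available. — e.g. on f(0): A returns -7, B returns 0
-- outside the precondition, e.g. on f(-1): A returns -7.5, B returns 0
import Mathlib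
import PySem

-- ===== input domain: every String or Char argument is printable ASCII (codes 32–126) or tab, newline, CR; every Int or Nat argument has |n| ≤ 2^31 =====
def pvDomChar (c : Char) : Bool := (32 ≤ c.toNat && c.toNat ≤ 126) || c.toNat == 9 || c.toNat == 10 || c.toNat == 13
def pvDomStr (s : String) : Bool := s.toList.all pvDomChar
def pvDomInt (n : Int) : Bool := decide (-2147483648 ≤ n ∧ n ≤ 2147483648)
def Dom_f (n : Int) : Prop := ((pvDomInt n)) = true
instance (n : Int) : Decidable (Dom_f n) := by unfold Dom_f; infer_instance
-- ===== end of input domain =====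

-- B replaces A's powerset enumeration by a per-maximum decomposition with a pruned
-- subset-sum count (objective: alternative); for 0 ≤ n < 3 B returns the intended 0 (see D_f).

-- ===== PORT A =====
-- Python max() on a nonempty tuple (A only applies it to nonempty subsets)
def pyMax (l : List Int) : Int :=
  match l with
  | [] => 0
  | h :: t => t.foldl max h

-- itertools.combinations(xs, k): k-element sublists in lexicographic order
def comb : Nat → List Int → List (List Int)
  | 0, _ => [[]]
  | _ + 1, [] => []
  | k + 1, x :: xs => ((comb k xs).map (x :: ·)) ++ comb (k + 1) xs

-- powerset(s) = chain(combinations(s, k) for k in 1..len(s))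
def powersetA (xs : List Int) : List (List Int) :=
  (List.range' 1 xs.length).flatMap (fun k => comb k xs)

-- while len(s) < n: s.append(s[-1] + s[-3]); fuel n.toNat is enough (n ≤ 2^31 in Dom)
def buildLoop (n : Int) : Nat → List Int → List Int
  | 0, s => s
  | fuel + 1, s =>
    if (s.length : Int) < n then
      buildLoop n fuel (s ++ [PySem.List.pyGetD s (-1) 0 + PySem.List.pyGetD s (-3) 0])
    else s

def f (n : Int) : Int :=
  let s := buildLoop n n.toNat [1, 2, 3]
  let rv : Int := 2 ^ n.toNat  -- 2**n; n ≥ 0 under Pre_f (Python gives a float for n < 0)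
  let rv := (powersetA s).foldl (fun rv i => if pyMax i * 2 ≥ i.sum then rv - 1 else rv) rv
  rv - 1

-- ===== PORT B =====
-- count_le(xs, B): xs[:-1] is PySem.List.slice xs none (some (-1)), xs[-1] is pyGetD (in range here)
def cntLe (xs : List Int) (B : Int) : Int :=
  if B < 0 then 0
  else if xs.sum ≤ B then 2 ^ xs.length
  else
    cntLe (PySem.List.slice xs none (some (-1))) B +
    cntLe (PySem.List.slice xs none (some (-1))) (B - PySem.List.pyGetD xs (-1) 0)
termination_by xs.length
decreasing_by
  all_goals
    simp only [PySem.List.slice_to_neg_one, List.length_dropLast]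
    cases xs with
    | nil => simp_all
    | cons a t => simp
def buildB (n : Int) : List Int × Int × Int × Int :=
  (PySem.List.pyRange 0 n 1).foldl
    (fun st _ => (st.1 ++ [st.2.1], st.2.2.1, st.2.2.2, st.2.2.2 + st.2.1))
    ([], 1, 2, 3)

def f_alt (n : Int) : Int :=
  let s := (buildB n).1
  let r := s.foldl
    (fun (st : Int × List Int) x => (st.1 + 2 ^ st.2.length - cntLe st.2 x, st.2 ++ [x]))
    (0, [])
  r.1

-- ===== PRECONDITION & SPEC =====
-- Pre_f excludes n < 0, where Python's 2**n is a float, so A returns no int (e.g. f(-1) = -7.5).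
def Pre_f (n : Int) : Prop := 0 ≤ n
instance (n : Int) : Decidable (Pre_f n) := by unfold Pre_f; infer_instance
def pvWitness_f : Int := 3

-- For n below three, A still tests all seven nonempty subsets of its hard-coded seed list
-- against the smaller power 2**n and returns a negative count, while B counts polygon subsets
-- of the first n terms only and returns zero, the intended count when fewer than three sides
-- are available.
def D_f (n : Int) : Prop := 0 ≤ n ∧ n < 3
instance (n : Int) : Decidable (D_f n) := by unfold D_f; infer_instance

def Spec_f (n : Int) (out : Int) : Prop := ¬ D_f n → out = f_alt n
instance (n : Int) (out : Int) : Decidable (Spec_f n out) := by unfold Spec_f; infer_instance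

def pvDiffWitness_f : Int := 0
def pvDiffWitnessOut_f : Int × Int := (-7, 0)

-- ===== CLAIM (what is proved, stated in full; the proofs are below) =====
def Claim_unchanged_f : Prop := ∀ (n : Int), Dom_f n → Pre_f n → Spec_f n (f n)
def Claim_changed_f : Prop := Dom_f (pvDiffWitness_f) ∧ Pre_f (pvDiffWitness_f) ∧ D_f (pvDiffWitness_f) ∧ f (pvDiffWitness_f) = pvDiffWitnessOut_f.1 ∧ f_alt (pvDiffWitness_f) = pvDiffWitnessOut_f.2 ∧ pvDiffWitnessOut_f.1 ≠ pvDiffWitnessOut_f.2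
def Claim_exact_f : Prop := ∀ (n : Int), Dom_f n → Pre_f n → D_f n → f n ≠ f_alt n

-- ===== LEMMAS AND PROOFS =====

-- the sequence 1, 2, 3, s(k) = s(k-1) + s(k-3)
def term : Nat → Int
  | 0 => 1
  | 1 => 2
  | 2 => 3
  | k + 3 => term (k + 2) + term k

def seqL (n : Nat) : List Int := (List.range n).map term

-- A's bad-subset test
def pBad (t : List Int) : Bool := pyMax t * 2 ≥ t.sum

theorem term_add3 (k : Nat) : term (k + 3) = term (k + 2) + term k := by rw [term]

theorem term_pos : ∀ k, 1 ≤ term k := by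
  intro k
  induction k using term.induct with
  | case1 => decide
  | case2 => decide
  | case3 => decide
  | case4 k ih1 ih2 => rw [term]; omega

theorem term_lt_succ (k : Nat) : term k < term (k + 1) := by
  match k with
  | 0 => decide
  | 1 => decide
  | 2 => decide
  | (m + 3) =>
    have h1 : m + 3 + 1 = (m + 1) + 3 := by omega
    rw [h1, term_add3 (m + 1)]
    have h2 : (m + 1) + 2 = m + 3 := by omega
    rw [h2]
    have := term_pos (m + 1)
    omega

theorem term_strictMono : StrictMono term :=
  strictMono_nat_of_lt_succ term_lt_succ

theorem seqL_succ (n : Nat) : seqL (n + 1) = seqL n ++ [term n] := by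
  simp [seqL, List.range_succ]

theorem seqL_length (n : Nat) : (seqL n).length = n := by simp [seqL]

theorem seqL_pairwise (n : Nat) : (seqL n).Pairwise (· < ·) :=
  List.Pairwise.map term (fun _ _ h => term_strictMono h) List.pairwise_lt_range

theorem seqL_pos (n : Nat) : ∀ x ∈ seqL n, 0 < x := by
  intro x hx
  simp only [seqL, List.mem_map, List.mem_range] at hx
  obtain ⟨k, _, rfl⟩ := hx
  have := term_pos k; omega

-- max over a nonempty list ending in its largest element
theorem foldl_max_concat (a : Int) : ∀ (l : List Int) (acc : Int), acc ≤ a →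
    (∀ x ∈ l, x ≤ a) → (l ++ [a]).foldl max acc = a := by
  intro l
  induction l with
  | nil => intro acc hacc _; simpa using hacc
  | cons x t ih =>
    intro acc hacc h
    simp only [List.cons_append, List.foldl_cons]
    exact ih _ (max_le hacc (h x (by simp))) (fun y hy => h y (by simp [hy]))

theorem pyMax_concat (t : List Int) (a : Int) (h : ∀ x ∈ t, x ≤ a) :
    pyMax (t ++ [a]) = a := by
  cases t with
  | nil => simp [pyMax]
  | cons x l =>
    simp only [List.cons_append, pyMax]
    exact foldl_max_concat a l x (h x (by simp)) (fun y hy => h y (by simp [hy]))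

-- grouping by the last (= maximal) element
theorem countP_sublists_concat (ys : List Int) (a : Int) (h : ∀ x ∈ ys, x ≤ a) :
    ((ys ++ [a]).sublists.countP pBad : Int) =
      (ys.sublists.countP pBad : Int) +
      (ys.sublists.countP (fun t => t.sum ≤ a) : Int) := by
  rw [List.sublists_concat, List.countP_append, List.countP_map]
  have hcg : ∀ t ∈ ys.sublists,
      ((pBad ∘ fun x => x ++ [a]) t = true ↔ (fun t : List Int => decide (t.sum ≤ a)) t = true) := by
    intro t ht
    have hsub : t.Sublist ys := List.mem_sublists.1 ht
    have hmax : pyMax (t ++ [a]) = a :=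
      pyMax_concat t a (fun x hx => h x (hsub.subset hx))
    simp only [Function.comp_apply, pBad, hmax, List.sum_append, List.sum_cons,
      List.sum_nil, ge_iff_le, decide_eq_true_eq]
    omega
  rw [List.countP_congr hcg]
  push_cast
  ring

-- sublist sums of nonneg lists
theorem sum_nonneg_of_sublist {t xs : List Int} (h : t.Sublist xs) (hx : ∀ x ∈ xs, 0 ≤ x) :
    0 ≤ t.sum :=
  List.sum_nonneg (fun x hxt => hx x (h.subset hxt))

theorem sum_le_of_sublist : ∀ {t xs : List Int}, t.Sublist xs →
    (∀ x ∈ xs, 0 ≤ x) → t.sum ≤ xs.sum := by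
  intro t xs h
  induction h with
  | slnil => intro _; simp
  | cons y h ih =>
    intro hx
    have h1 := ih (fun x hm => hx x (by simp [hm]))
    have hy : 0 ≤ y := hx y (by simp)
    simp only [List.sum_cons]
    omega
  | cons₂ y h ih =>
    intro hx
    have h1 := ih (fun x hm => hx x (by simp [hm]))
    simp only [List.sum_cons]
    omega

-- cntLe counts sublists with sum ≤ B
theorem cntLe_eq (xs : List Int) (B : Int) (hx : ∀ x ∈ xs, 0 ≤ x) :
    cntLe xs B = (xs.sublists.countP (fun t => t.sum ≤ B) : Int) := by
  induction xs using List.reverseRecOn generalizing B with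
  | nil =>
    rw [cntLe.eq_def]
    simp only [List.sublists_nil, List.length_nil, List.sum_nil, pow_zero,
      List.countP_cons, List.countP_nil, List.sum_nil]
    split_ifs with h1 h2 <;> simp_all
    omega
  | append_singleton ys a ih =>
    rw [cntLe.eq_def]
    by_cases hB : B < 0
    · rw [if_pos hB, eq_comm]
      simp only [Int.natCast_eq_zero, List.countP_eq_zero]
      intro t ht
      have := sum_nonneg_of_sublist (List.mem_sublists.1 ht) hx
      simp only [decide_eq_true_eq]
      omega
    · rw [if_neg hB]
      by_cases hS : (ys ++ [a]).sum ≤ B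
      · rw [if_pos hS, eq_comm]
        have hall : (ys ++ [a]).sublists.countP (fun t => t.sum ≤ B) =
            (ys ++ [a]).sublists.length := by
          apply List.countP_eq_length.2
          intro t ht
          have h1 := sum_le_of_sublist (List.mem_sublists.1 ht) hx
          simp only [decide_eq_true_eq]
          omega
        rw [hall, List.length_sublists]
        push_cast
        simp
      · rw [if_neg hS]
        have hys : ∀ x ∈ ys, 0 ≤ x := fun x hxm => hx x (by simp [hxm])
        simp only [PySem.List.slice_to_neg_one, List.dropLast_concat,
          PySem.List.pyGetD_neg_one_append_singleton]
        rw [ih B hys, ih (B - a) hys]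
        rw [List.sublists_concat, List.countP_append, List.countP_map]
        have hcg : ∀ t ∈ ys.sublists,
            (((fun t : List Int => decide (t.sum ≤ B)) ∘ fun x => x ++ [a]) t = true ↔
              (fun t : List Int => decide (t.sum ≤ B - a)) t = true) := by
          intro t _
          simp only [Function.comp_apply, List.sum_append, List.sum_cons, List.sum_nil,
            decide_eq_true_eq]
          omega
        rw [List.countP_congr hcg]
        push_cast
        ring

-- comb counts what sublistsLen counts
theorem countP_comb : ∀ (xs : List Int) (q : List Int → Bool) (k : Nat),
    (comb k xs).countP q = (List.sublistsLen k xs).countP q := by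
  intro xs
  induction xs with
  | nil =>
    intro q k
    cases k with
    | zero => rfl
    | succ k => rfl
  | cons x xs ih =>
    intro q k
    cases k with
    | zero => rfl
    | succ k =>
      rw [show comb (k + 1) (x :: xs) = ((comb k xs).map (x :: ·)) ++ comb (k + 1) xs from rfl,
        List.sublistsLen_succ_cons, List.countP_append, List.countP_append,
        List.countP_map, List.countP_map, ih, ih]
      simp only [show (fun x_1 : List Int => x :: x_1) = List.cons x from rfl]
      omega

theorem countP_flatMap_comb (xs : List Int) (q : List Int → Bool) :
    ∀ (ks : List Nat),
      ((ks.flatMap fun n => List.sublistsLen n xs).countP q) =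
      ((ks.flatMap fun n => comb n xs).countP q) := by
  intro ks
  induction ks with
  | nil => rfl
  | cons k l ihl =>
    simp only [List.flatMap_cons, List.countP_append, ihl, countP_comb]

-- A's powerset plus the empty subset counts what sublists counts
theorem countP_powersetA (xs : List Int) (q : List Int → Bool) :
    (xs.sublists).countP q = (q []).toNat + (powersetA xs).countP q := by
  have hperm : ((List.range (xs.length + 1)).flatMap fun n => List.sublistsLen n xs).Perm
      xs.sublists :=
    (List.range_bind_sublistsLen_perm xs).trans (List.sublists_perm_sublists' xs).symm
  have hsplit : List.range (xs.length + 1) = 0 :: List.range' 1 xs.length := by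
    rw [List.range_eq_range']
    rfl
  have h1 : ((List.range (xs.length + 1)).flatMap fun n => List.sublistsLen n xs).countP q =
      (q []).toNat +
        ((List.range' 1 xs.length).flatMap fun n => List.sublistsLen n xs).countP q := by
    rw [hsplit, List.flatMap_cons, List.countP_append, List.sublistsLen_zero]
    cases hq : q [] <;> simp [hq]
  rw [← hperm.countP_eq, h1, countP_flatMap_comb]
  rfl

-- A's decrement loop
theorem foldl_sub_count (l : List (List Int)) (r0 : Int) :
    l.foldl (fun rv i => if pyMax i * 2 ≥ i.sum then rv - 1 else rv) r0 =
      r0 - (l.countP pBad : Int) := by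
  induction l generalizing r0 with
  | nil => simp
  | cons t l ih =>
    simp only [List.foldl_cons, List.countP_cons, ih, pBad, ge_iff_le, decide_eq_true_eq]
    split_ifs with h <;> (push_cast; omega)

-- A's builder reaches seqL
theorem buildLoop_seq (n : Int) : ∀ (fuel m : Nat), 3 ≤ m → n ≤ (m : Int) + fuel →
    buildLoop n fuel (seqL m) = seqL (max m n.toNat) := by
  intro fuel
  induction fuel with
  | zero =>
    intro m h3 hle
    have hmn : n.toNat ≤ m := by omega
    rw [buildLoop, Nat.max_eq_left hmn]
  | succ fuel ih =>
    intro m h3 hle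
    rw [buildLoop]
    by_cases hc : ((seqL m).length : Int) < n
    · rw [if_pos hc]
      rw [seqL_length] at hc
      have hm1 : PySem.List.pyGetD (seqL m) (-1) 0 = term (m - 1) := by
        rw [PySem.List.pyGetD_neg_ofNat (seqL m) 1 0 (by omega) (by rw [seqL_length]; omega)]
        simp only [seqL, List.length_map, List.length_range, List.getElem_map,
          List.getElem_range]
      have hm3 : PySem.List.pyGetD (seqL m) (-3) 0 = term (m - 3) := by
        rw [PySem.List.pyGetD_neg_ofNat (seqL m) 3 0 (by omega) (by rw [seqL_length]; omega)]
        simp only [seqL, List.length_map, List.length_range, List.getElem_map,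
          List.getElem_range]
      have hterm : term (m - 1) + term (m - 3) = term m := by
        have hm : m = (m - 3) + 3 := by omega
        rw [hm, term_add3]
        congr 2
      rw [hm1, hm3, hterm, ← seqL_succ, ih (m + 1) (by omega) (by push_cast; omega)]
      congr 1
      omega
    · rw [if_neg hc]
      rw [seqL_length] at hc
      have hmn : n.toNat ≤ m := by omega
      rw [Nat.max_eq_left hmn]

-- B's builder reaches seqL
theorem buildB_seq (n : Int) :
    buildB n = (seqL n.toNat, term n.toNat, term (n.toNat + 1), term (n.toNat + 2)) := by
  unfold buildB
  rw [PySem.List.pyRange_one]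
  simp only [Int.sub_zero]
  rw [List.foldl_map]
  generalize n.toNat = N
  induction N with
  | zero => rfl
  | succ k ih =>
    rw [List.range_succ, List.foldl_append, ih]
    simp only [List.foldl_cons, List.foldl_nil]
    rw [seqL_succ]
    have h1 : k + 1 + 1 = k + 2 := rfl
    have h2 : k + 1 + 2 = k + 3 := rfl
    rw [h1, h2, term_add3]

-- B's outer fold keeps the processed prefix in its second component
theorem foldB_snd (l : List Int) (g0 : Int) (p0 : List Int) :
    (l.foldl (fun (st : Int × List Int) x =>
      (st.1 + 2 ^ st.2.length - cntLe st.2 x, st.2 ++ [x])) (g0, p0)).2 = p0 ++ l := by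
  induction l generalizing g0 p0 with
  | nil => simp
  | cons x t ih => simp [ih]

theorem foldB_main : ∀ (s : List Int), s.Pairwise (· < ·) → (∀ x ∈ s, 0 < x) →
    (s.foldl (fun (st : Int × List Int) x =>
      (st.1 + 2 ^ st.2.length - cntLe st.2 x, st.2 ++ [x])) (0, [])).1 =
      2 ^ s.length - (s.sublists.countP pBad : Int) := by
  intro s
  induction s using List.reverseRecOn with
  | nil =>
    intro _ _
    simp [List.sublists_nil, pBad, pyMax]
  | append_singleton ys a ih =>
    intro hpw hpos
    have hpwys : ys.Pairwise (· < ·) := (List.pairwise_append.1 hpw).1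
    have hlt : ∀ x ∈ ys, x < a := by
      intro x hxm
      exact (List.pairwise_append.1 hpw).2.2 x hxm a (by simp)
    have hposys : ∀ x ∈ ys, 0 < x := fun x h => hpos x (by simp [h])
    rw [List.foldl_append]
    have h2 := foldB_snd ys 0 []
    simp only [List.nil_append] at h2
    simp only [List.foldl_cons, List.foldl_nil, h2]
    rw [ih hpwys hposys]
    rw [cntLe_eq ys a (fun x h => le_of_lt (hposys x h))]
    rw [countP_sublists_concat ys a (fun x h => le_of_lt (hlt x h))]
    simp only [List.length_append, List.length_cons, List.length_nil]
    push_cast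
    ring

-- closed-form evaluations at the witness inputs (cntLe is well-founded, so no kernel reduction)
theorem cntLe_nil (B : Int) (h : 0 ≤ B) : cntLe [] B = 1 := by
  rw [cntLe.eq_def]
  simp [Int.not_lt.2 h]

theorem cntLe_one_two : cntLe [1] 2 = 2 := by
  rw [cntLe.eq_def]
  norm_num

theorem f_alt_zero : f_alt 0 = 0 := by
  rw [show f_alt 0 = ((buildB 0).1.foldl
      (fun (st : Int × List Int) x =>
        (st.1 + 2 ^ st.2.length - cntLe st.2 x, st.2 ++ [x])) (0, [])).1 from rfl, buildB_seq]
  rfl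

theorem f_alt_one : f_alt 1 = 0 := by
  rw [show f_alt 1 = ((buildB 1).1.foldl
      (fun (st : Int × List Int) x =>
        (st.1 + 2 ^ st.2.length - cntLe st.2 x, st.2 ++ [x])) (0, [])).1 from rfl, buildB_seq]
  show ((0 + 2 ^ (0:Nat) - cntLe [] (term 0), _).1 : Int) = 0
  rw [show term 0 = 1 from rfl, cntLe_nil 1 (by omega)]
  norm_num

theorem f_alt_two : f_alt 2 = 0 := by
  rw [show f_alt 2 = ((buildB 2).1.foldl
      (fun (st : Int × List Int) x =>
        (st.1 + 2 ^ st.2.length - cntLe st.2 x, st.2 ++ [x])) (0, [])).1 from rfl, buildB_seq]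
  show ((0 + 2 ^ (0:Nat) - cntLe [] (term 0) + 2 ^ (1:Nat) - cntLe [term 0] (term 1), _).1 : Int) = 0
  rw [show term 0 = 1 from rfl, show term 1 = 2 from rfl, cntLe_nil 1 (by omega), cntLe_one_two]
  norm_num

theorem main_eq (n : Int) (h3 : 3 ≤ n) : f n = f_alt n := by
  have hN : 3 ≤ n.toNat := by omega
  have hbuild : buildLoop n n.toNat [1, 2, 3] = seqL n.toNat := by
    rw [show ([1, 2, 3] : List Int) = seqL 3 by decide,
      buildLoop_seq n n.toNat 3 (by omega) (by omega), Nat.max_eq_right hN]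
  have hcount := countP_powersetA (seqL n.toNat) pBad
  rw [show pBad [] = true by decide] at hcount
  have hcast : ((seqL n.toNat).sublists.countP pBad : Int) =
      1 + ((powersetA (seqL n.toNat)).countP pBad : Int) := by
    rw [hcount]; push_cast; norm_num
  have hA : f n = 2 ^ n.toNat - ((seqL n.toNat).sublists.countP pBad : Int) := by
    rw [show f n = (powersetA (buildLoop n n.toNat [1, 2, 3])).foldl
        (fun rv i => if pyMax i * 2 ≥ i.sum then rv - 1 else rv) (2 ^ n.toNat) - 1 from rfl]
    rw [hbuild, foldl_sub_count, hcast]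
    ring
  have hB : f_alt n = 2 ^ n.toNat - ((seqL n.toNat).sublists.countP pBad : Int) := by
    rw [show f_alt n = ((buildB n).1.foldl
        (fun (st : Int × List Int) x =>
          (st.1 + 2 ^ st.2.length - cntLe st.2 x, st.2 ++ [x])) (0, [])).1 from rfl]
    rw [buildB_seq]
    simp only
    rw [foldB_main (seqL n.toNat) (seqL_pairwise _) (seqL_pos _), seqL_length]
  rw [hA, hB]

-- ===== VERDICT (by name: the statement is the Claim_ definition above) =====
theorem f_spec : Claim_unchanged_f := by
  intro n _ hpre
  unfold Spec_f
  intro hD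
  have h3 : 3 ≤ n := by
    unfold Pre_f at hpre
    unfold D_f at hD
    by_contra h
    exact hD ⟨hpre, by omega⟩
  exact main_eq n h3

theorem f_changed : Claim_changed_f := by
  unfold Claim_changed_f
  refine ⟨by decide, by decide, by decide, by decide, ?_, by decide⟩
  exact f_alt_zero

theorem f_tight : Claim_exact_f := by
  intro n _ hpre hD
  unfold Pre_f at hpre
  unfold D_f at hD
  obtain ⟨h1, h2⟩ := hD
  interval_cases n
  · rw [show f 0 = -7 from rfl, f_alt_zero]; decide
  · rw [show f 1 = -6 from rfl, f_alt_one]; decide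
  · rw [show f 2 = -4 from rfl, f_alt_two]; decide
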